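-- pv_equiv track=rewrite | github.com/ctoth/propstore | tests/test_support_realization_postulates.py | _is_minimal_hitting_set
-- ===== SOURCE A (Python) =====
-- from itertools import combinations
--
-- def _has_surviving_support(
--     support_sets: tuple[tuple[str, ...], ...],
--     incision_set: tuple[str, ...],
-- ) -> bool:
--     incised = set(incision_set)
--     return any(all(assumption_id not in incised for assumption_id in support_set) for support_set in support_sets)
--
-- def _is_minimal_hitting_set(
--     support_sets: tuple[tuple[str, ...], ...],
--     incision_set: tuple[str, ...],
-- ) -> bool:
--     incised = tuple(incision_set)
--     for size in range(len(incised)):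
--         for subset in combinations(incised, size):
--             if not _has_surviving_support(support_sets, tuple(subset)):
--                 return False
--     return True
-- ===== SOURCE B (Python) =====
-- def _is_minimal_hitting_set(support_sets, incision_set):
--     # Hitting all support sets is upward-closed, so a proper subset that hits
--     # everything exists iff some single-element removal still hits everything.
--     incised = tuple(incision_set)
--     for i in range(len(incised)):
--         reduced = set(incised[:i] + incised[i + 1:])
--         if all(any(a in reduced for a in ss) for ss in support_sets):
--             return False
--     return True
-- ===== Notes on version B (the rewrite author's own statement) =====
-- stated objective: faster
-- what changed: A tests every proper subset of the incision set via itertools.combinations; since hitting all support sets is upward-closed, B only tests the n single-element removals.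
import Mathlib
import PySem

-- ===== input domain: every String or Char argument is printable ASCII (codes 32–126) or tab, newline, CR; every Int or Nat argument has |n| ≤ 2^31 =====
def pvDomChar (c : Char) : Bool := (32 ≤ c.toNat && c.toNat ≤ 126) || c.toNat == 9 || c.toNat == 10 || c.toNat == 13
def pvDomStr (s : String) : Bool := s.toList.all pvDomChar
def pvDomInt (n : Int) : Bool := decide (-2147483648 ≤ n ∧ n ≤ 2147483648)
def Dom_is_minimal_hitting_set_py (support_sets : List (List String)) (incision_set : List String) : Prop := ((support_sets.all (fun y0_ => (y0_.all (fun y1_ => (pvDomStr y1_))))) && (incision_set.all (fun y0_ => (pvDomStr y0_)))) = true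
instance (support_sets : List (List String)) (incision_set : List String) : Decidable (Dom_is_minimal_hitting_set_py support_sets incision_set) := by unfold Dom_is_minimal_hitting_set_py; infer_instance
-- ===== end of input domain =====

-- B replaces A's scan over all 2^n proper subsets by a scan over the n single-element
-- removals (hitting all support sets is upward-closed), an asymptotic speed-up.

-- ===== PORT A =====
def pvHasSurvivingSupport (support_sets : List (List String)) (incision_set : List String) : Bool :=
  let incised : PySem.Set String := PySem.Set.ofList incision_set
  support_sets.any (fun support_set =>
    support_set.all (fun assumption_id => !(PySem.Set.contains incised assumption_id)))

-- itertools.combinations(l, n) (as lists; order of generation is irrelevant to A's result)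
def pvCombos : List String → Nat → List (List String)
  | _, 0 => [[]]
  | [], _ + 1 => []
  | x :: xs, n + 1 => (pvCombos xs n).map (fun t => x :: t) ++ pvCombos xs (n + 1)

def is_minimal_hitting_set_py (support_sets : List (List String)) (incision_set : List String) : Bool :=
  (List.range incision_set.length).all (fun size =>
    (pvCombos incision_set size).all (fun subset =>
      pvHasSurvivingSupport support_sets subset))

-- ===== PORT B =====
def pvKillsAll (support_sets : List (List String)) (reduced : PySem.Set String) : Bool :=
  support_sets.all (fun ss => ss.any (fun a => PySem.Set.contains reduced a))

def is_minimal_hitting_set_py_alt (support_sets : List (List String)) (incision_set : List String) : Bool :=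
  !((List.range incision_set.length).any (fun i =>
      pvKillsAll support_sets
        (PySem.Set.ofList (incision_set.take i ++ incision_set.drop (i + 1)))))

-- ===== PRECONDITION & SPEC =====
def Spec_is_minimal_hitting_set_py (support_sets : List (List String)) (incision_set : List String) (out : Bool) : Prop := out = is_minimal_hitting_set_py_alt support_sets incision_set
instance (support_sets : List (List String)) (incision_set : List String) (out : Bool) : Decidable (Spec_is_minimal_hitting_set_py support_sets incision_set out) := by unfold Spec_is_minimal_hitting_set_py; infer_instance

-- ===== CLAIM (what is proved, stated in full; the proofs are below) =====
def Claim_equal_is_minimal_hitting_set_py : Prop := ∀ (support_sets : List (List String)) (incision_set : List String), Dom_is_minimal_hitting_set_py support_sets incision_set → Spec_is_minimal_hitting_set_py support_sets incision_set (is_minimal_hitting_set_py support_sets incision_set)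

-- ===== LEMMAS AND PROOFS =====

-- "s hits every support set" as a proposition
def pvHits (support_sets : List (List String)) (s : List String) : Prop :=
  ∀ t ∈ support_sets, ∃ a ∈ t, a ∈ s

theorem pvHasSurvivingSupport_eq_false {support_sets : List (List String)} {s : List String} :
    pvHasSurvivingSupport support_sets s = false ↔ pvHits support_sets s := by
  simp [pvHasSurvivingSupport, pvHits, PySem.Set.mem_ofList,
    List.any_eq_false, List.all_eq_true]

theorem pvKillsAll_eq_true {support_sets : List (List String)} {r : List String} :
    pvKillsAll support_sets (PySem.Set.ofList r) = true ↔ pvHits support_sets r := by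
  simp [pvKillsAll, pvHits, List.all_eq_true, List.any_eq_true, PySem.Set.mem_ofList]

theorem mem_pvCombos (l : List String) (n : Nat) (s : List String) :
    s ∈ pvCombos l n ↔ s.Sublist l ∧ s.length = n := by
  induction l generalizing n s with
  | nil =>
    cases n with
    | zero => simp [pvCombos, List.length_eq_zero_iff]
    | succ n =>
      simp only [pvCombos, List.not_mem_nil, false_iff]
      rintro ⟨hs, hl⟩
      simp [List.sublist_nil] at hs
      simp [hs] at hl
  | cons x xs ih =>
    cases n with
    | zero =>
      constructor
      · intro h; simp [pvCombos] at h; simp [h]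
      · rintro ⟨_, hl⟩
        simp [List.length_eq_zero_iff] at hl
        simp [pvCombos, hl]
    | succ n =>
      simp only [pvCombos, List.mem_append, List.mem_map]
      rw [List.sublist_cons_iff]
      constructor
      · rintro (⟨t, ht, rfl⟩ | h)
        · rcases (ih n t).mp ht with ⟨hsub, hlen⟩
          exact ⟨Or.inr ⟨t, rfl, hsub⟩, by simp [hlen]⟩
        · rcases (ih (n + 1) s).mp h with ⟨hsub, hlen⟩
          exact ⟨Or.inl hsub, hlen⟩
      · rintro ⟨h | ⟨r, rfl, hr⟩, hlen⟩
        · exact Or.inr ((ih (n + 1) s).mpr ⟨h, hlen⟩)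
        · exact Or.inl ⟨r, (ih n r).mpr ⟨hr, by simpa using hlen⟩, rfl⟩

-- a strictly shorter sublist stays a sublist after erasing some index
theorem exists_eraseIdx_sublist :
    ∀ (l s : List String), s.Sublist l → s.length < l.length →
      ∃ i, i < l.length ∧ s.Sublist (l.eraseIdx i) := by
  intro l
  induction l with
  | nil => intro s _ hl; simp at hl
  | cons x xs ih =>
    intro s h hl
    cases h with
    | cons _ h' =>
      exact ⟨0, by simp, by simpa using h'⟩
    | cons₂ _ h' =>
      rename_i s'
      have hlt : s'.length < xs.length := by simpa using hl
      rcases ih s' h' hlt with ⟨i, hi, hs⟩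
      exact ⟨i + 1, by simpa using hi, by simpa [List.eraseIdx_cons_succ] using hs.cons₂ x⟩

theorem pvHits_mono {support_sets : List (List String)} {s t : List String}
    (hsub : ∀ a ∈ s, a ∈ t) (h : pvHits support_sets s) : pvHits support_sets t := by
  intro u hu
  rcases h u hu with ⟨a, ha, hm⟩
  exact ⟨a, ha, hsub a hm⟩

theorem pvHSS_true (support_sets : List (List String)) (s : List String) :
    pvHasSurvivingSupport support_sets s = true ↔ ¬ pvHits support_sets s := by
  rw [← pvHasSurvivingSupport_eq_false]
  cases pvHasSurvivingSupport support_sets s <;> simp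

-- ===== VERDICT (by name: the statement is the Claim_ definition above) =====
theorem is_minimal_hitting_set_py_spec : Claim_equal_is_minimal_hitting_set_py := by
  intro support_sets incision_set _
  unfold Spec_is_minimal_hitting_set_py is_minimal_hitting_set_py is_minimal_hitting_set_py_alt
  rw [Bool.eq_iff_iff]
  simp only [List.all_eq_true, List.mem_range, Bool.not_eq_true', List.any_eq_false,
    ← List.eraseIdx_eq_take_drop_succ]
  constructor
  · intro hA i hi
    rw [pvKillsAll_eq_true]
    intro hit
    have hsub : (incision_set.eraseIdx i).Sublist incision_set := List.eraseIdx_sublist ..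
    have hlen : (incision_set.eraseIdx i).length < incision_set.length := by
      rw [List.length_eraseIdx]
      simp [hi]
      omega
    have := hA _ hlen _ ((mem_pvCombos _ _ _).mpr ⟨hsub, rfl⟩)
    exact (pvHSS_true _ _).mp this hit
  · intro hB size hsize s hs
    rcases (mem_pvCombos _ _ _).mp hs with ⟨hsub, hlen⟩
    rw [pvHSS_true]
    intro hit
    rcases exists_eraseIdx_sublist _ _ hsub (by omega) with ⟨i, hi, hsi⟩
    have h2 := hB i hi
    rw [pvKillsAll_eq_true] at h2
    exact h2 (pvHits_mono hsi.subset hit)
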